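-- pv_equiv track=rewrite | github.com/muhammedfadera/Project-Euler | python/Problem-32.py | all_digits_1_to_9
-- ===== SOURCE A (Python) =====
-- def all_digits_1_to_9(x, y, z):
--       '''
--       checks if the combination of x, y and z contains all digits from 1 to 9 onces
--       '''
--       xyz = str(x) + str(y) + str(z)
--       if len(xyz) != 9:
--             return False
--       for i in range(1, 10):
--             if str(i) not in xyz:
--                   return False
--       return True
-- ===== SOURCE B (Python) =====
-- def all_digits_1_to_9(x, y, z):
--     '''
--     checks if the combination of x, y and z contains all digits from 1 to 9 onces
--     '''
--     return sorted(str(x) + str(y) + str(z)) == list("123456789")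
-- ===== Notes on version B (the rewrite author's own statement) =====
-- stated objective: simpler
-- what changed: Replaces A's length guard plus a nine-iteration membership loop with a single sort of the concatenated digit string compared against list('123456789').
import Mathlib
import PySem

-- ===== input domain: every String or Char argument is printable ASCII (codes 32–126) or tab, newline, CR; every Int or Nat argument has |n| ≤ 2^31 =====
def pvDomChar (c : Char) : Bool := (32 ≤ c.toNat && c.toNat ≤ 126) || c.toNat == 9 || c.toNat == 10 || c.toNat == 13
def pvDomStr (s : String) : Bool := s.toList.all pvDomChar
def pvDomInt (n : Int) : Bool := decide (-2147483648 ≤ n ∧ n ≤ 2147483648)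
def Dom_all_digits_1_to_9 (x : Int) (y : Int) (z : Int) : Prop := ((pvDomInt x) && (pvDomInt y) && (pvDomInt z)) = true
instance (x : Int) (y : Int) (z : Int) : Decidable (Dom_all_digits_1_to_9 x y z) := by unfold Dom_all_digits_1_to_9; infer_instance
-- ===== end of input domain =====

-- B replaces A's length guard plus per-digit membership loop by sorting the concatenated
-- digit string once and comparing it to "123456789" (objective: simpler).

-- ===== PORT A =====
-- xyz = str(x) + str(y) + str(z); if len(xyz) != 9: return False;
-- for i in range(1, 10): if str(i) not in xyz: return False; return True
-- (strings ported on the List Char side: str(n) = PySem.Int.toChars, 'in' = PySem.Chars.isIn;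
--  the early-return loop over range(1,10) is List.all over PySem.List.pyRange 1 10 1)
def all_digits_1_to_9 (x : Int) (y : Int) (z : Int) : Bool :=
  let xyz := PySem.Int.toChars x ++ PySem.Int.toChars y ++ PySem.Int.toChars z
  if xyz.length ≠ 9 then false
  else (PySem.List.pyRange 1 10 1).all (fun i => PySem.Chars.isIn (PySem.Int.toChars i) xyz)

-- ===== PORT B =====
-- return sorted(str(x) + str(y) + str(z)) == list("123456789")
def all_digits_1_to_9_alt (x : Int) (y : Int) (z : Int) : Bool :=
  PySem.List.sorted (PySem.Int.toChars x ++ PySem.Int.toChars y ++ PySem.Int.toChars z)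
      (fun c => c) false
    == ['1', '2', '3', '4', '5', '6', '7', '8', '9']

-- ===== PRECONDITION & SPEC =====
def Spec_all_digits_1_to_9 (x : Int) (y : Int) (z : Int) (out : Bool) : Prop := out = all_digits_1_to_9_alt x y z
instance (x : Int) (y : Int) (z : Int) (out : Bool) : Decidable (Spec_all_digits_1_to_9 x y z out) := by unfold Spec_all_digits_1_to_9; infer_instance

-- ===== CLAIM (what is proved, stated in full; the proofs are below) =====
def Claim_equal_all_digits_1_to_9 : Prop := ∀ (x : Int) (y : Int) (z : Int), Dom_all_digits_1_to_9 x y z → Spec_all_digits_1_to_9 x y z (all_digits_1_to_9 x y z)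

-- ===== LEMMAS AND PROOFS =====

-- the target list of B, as a named abbreviation for the proofs
def pvDigits : List Char := ['1', '2', '3', '4', '5', '6', '7', '8', '9']

-- 'str(i) in xyz' for a single digit character is membership
theorem pv_isIn_singleton (c : Char) (s : List Char) :
    PySem.Chars.isIn [c] s = true ↔ c ∈ s := by
  rw [PySem.Chars.isIn_iff_infix, List.singleton_infix_iff]

-- core: a character list sorts to "123456789" iff it has length 9 and contains every digit 1–9
theorem pv_sorted_eq_digits_iff (cs : List Char) :
    PySem.List.sorted cs (fun c => c) false = pvDigits ↔
      (cs.length = 9 ∧ ∀ c ∈ pvDigits, c ∈ cs) := by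
  constructor
  · intro h
    have hperm : cs.Perm pvDigits := by
      have := PySem.List.sorted_perm cs (fun c => c) false
      rw [h] at this
      exact this.symm
    exact ⟨by simpa [pvDigits] using hperm.length_eq,
           fun c hc => (hperm.mem_iff).mpr hc⟩
  · rintro ⟨hlen, hmem⟩
    have hnodup : pvDigits.Nodup := by decide
    have hsub : pvDigits.Subperm cs := List.subperm_of_subset hnodup (fun c hc => hmem c hc)
    have hperm : pvDigits.Perm cs :=
      List.Subperm.perm_of_length_le hsub (by simp [pvDigits, hlen])
    exact PySem.List.sorted_eq_of_perm_of_pairwise_lt cs pvDigits (fun c => c) hperm (by decide)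

theorem all_digits_eq (x y z : Int) :
    all_digits_1_to_9 x y z = all_digits_1_to_9_alt x y z := by
  unfold all_digits_1_to_9 all_digits_1_to_9_alt
  set cs := PySem.Int.toChars x ++ PySem.Int.toChars y ++ PySem.Int.toChars z with hcs
  rw [Bool.eq_iff_iff]
  have hrange : PySem.List.pyRange 1 10 1 = [1, 2, 3, 4, 5, 6, 7, 8, 9] := by decide
  constructor
  · intro h
    rw [beq_iff_eq]
    by_cases hlen : cs.length ≠ 9
    · simp [hlen] at h
    · rw [not_ne_iff] at hlen
      simp only [hlen, ne_eq, not_true_eq_false, if_false, hrange, List.all_cons,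
        List.all_nil, Bool.and_eq_true, Bool.and_true] at h
      refine (pv_sorted_eq_digits_iff cs).mpr ⟨hlen, ?_⟩
      intro c hc
      fin_cases hc <;>
        [exact (pv_isIn_singleton '1' cs).mp h.1;
         exact (pv_isIn_singleton '2' cs).mp h.2.1;
         exact (pv_isIn_singleton '3' cs).mp h.2.2.1;
         exact (pv_isIn_singleton '4' cs).mp h.2.2.2.1;
         exact (pv_isIn_singleton '5' cs).mp h.2.2.2.2.1;
         exact (pv_isIn_singleton '6' cs).mp h.2.2.2.2.2.1;
         exact (pv_isIn_singleton '7' cs).mp h.2.2.2.2.2.2.1;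
         exact (pv_isIn_singleton '8' cs).mp h.2.2.2.2.2.2.2.1;
         exact (pv_isIn_singleton '9' cs).mp h.2.2.2.2.2.2.2.2]
  · intro h
    rw [beq_iff_eq] at h
    obtain ⟨hlen, hmem⟩ := (pv_sorted_eq_digits_iff cs).mp h
    simp only [hlen, ne_eq, not_true_eq_false, if_false, hrange, List.all_cons,
      List.all_nil, Bool.and_eq_true, Bool.and_true]
    refine ⟨?_, ?_, ?_, ?_, ?_, ?_, ?_, ?_, ?_⟩ <;>
      exact (pv_isIn_singleton _ cs).mpr (hmem _ (by decide))

-- ===== VERDICT (by name: the statement is the Claim_ definition above) =====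
theorem all_digits_1_to_9_spec : Claim_equal_all_digits_1_to_9 := by
  intro x y z _
  unfold Spec_all_digits_1_to_9
  exact all_digits_eq x y z
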